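-- pv_equiv track=rewrite | github.com/prashanth-sams/python-workshop | projects/find_3_consecutive_strings.py | find_consecutive_3_strings
-- ===== SOURCE A (Python) =====
-- def find_consecutive_3_strings(value):
--     cons = 1
--     result = []
--
--     for i in range(len(value)):
--         for j in range(i, len(value)-1):
--             if value[i] == value[j+1]:
--                 cons += 1
--                 if cons == 3:
--                     result.append(value[i])
--                     break
--             else:
--                 break
--
--         cons = 1
--
--     return result
-- ===== SOURCE B (Python) =====
-- def find_consecutive_3_strings(value):
--     result = []
--     n = len(value)
--     i = 0
--     while i < n:
--         j = i + 1
--         while j < n and value[j] == value[i]: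
--             j += 1
--         run = j - i
--         if run >= 3:
--             result.extend([value[i]] * (run - 2))
--         i = j
--     return result
-- ===== Notes on version B (the rewrite author's own statement) =====
-- stated objective: faster
-- what changed: Replaces the quadratic overlapping per-index rescan (for each i, re-walk forward comparing value[i] to successors) with a single run-length pass that finds each maximal run of equal characters once and emits the run's character run-2 times.
import Mathlib
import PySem

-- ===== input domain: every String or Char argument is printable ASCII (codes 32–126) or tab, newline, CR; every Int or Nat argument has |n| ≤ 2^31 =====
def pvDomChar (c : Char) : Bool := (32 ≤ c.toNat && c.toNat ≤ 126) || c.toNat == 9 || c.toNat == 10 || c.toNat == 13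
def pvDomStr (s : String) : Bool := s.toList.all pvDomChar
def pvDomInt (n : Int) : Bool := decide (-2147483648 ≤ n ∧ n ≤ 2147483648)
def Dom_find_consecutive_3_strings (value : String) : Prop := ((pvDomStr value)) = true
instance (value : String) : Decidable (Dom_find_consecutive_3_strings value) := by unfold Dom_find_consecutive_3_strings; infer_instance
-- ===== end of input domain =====

-- B replaces A's quadratic overlapping per-index rescan by one linear run-length pass (measured faster).

-- ===== PORT A =====
-- inner loop: 'for j in range(i, len(value)-1): if value[i]==value[j+1]: cons+=1; if cons==3: append value[i]; break else: break'
-- returns some (value[i]) if the append fires, none otherwise (cons is reset to 1 after the loop, so it is local state)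
def pvAInner (v : List Char) (ci : Char) : Int → List Int → Option String
  | _, [] => none
  | cons, j :: js =>
      match PySem.List.pyGet? v (j + 1) with
      | none => none   -- unreachable: j + 1 ≤ len(value) - 1
      | some cj =>
          if ci = cj then
            if cons + 1 = 3 then some ci.toString
            else pvAInner v ci (cons + 1) js
          else none

-- outer loop: 'for i in range(len(value)): …'
def pvAOuter (v : List Char) : List Int → List String
  | [] => []
  | i :: is =>
      match PySem.List.pyGet? v i with
      | none => pvAOuter v is   -- unreachable: i < len(value)
      | some ci =>
          match pvAInner v ci 1 (PySem.List.pyRange i ((v.length : Int) - 1) 1) with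
          | some s => s :: pvAOuter v is
          | none => pvAOuter v is

def find_consecutive_3_strings (value : String) : List String :=
  pvAOuter value.toList (PySem.List.pyRange 0 (value.toList.length : Int) 1)

-- ===== PORT B =====
-- inner while loop of Source B: split off the maximal leading run equal to a; returns (run length beyond the head, rest)
def pvBRun (a : Char) : List Char → Nat × List Char
  | [] => (0, [])
  | b :: r => if b = a then ((pvBRun a r).1 + 1, (pvBRun a r).2) else (0, b :: r)

theorem pvBRun_rest_len (a : Char) (r : List Char) : (pvBRun a r).2.length ≤ r.length := by
  induction r with
  | nil => simp [pvBRun]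
  | cons b r ih => by_cases h : b = a <;> simp [pvBRun, h] <;> omega

-- outer while loop of Source B: per maximal run of length L emit its character L-2 times
def pvBLoop : List Char → List String
  | [] => []
  | a :: r =>
      List.replicate (((pvBRun a r).1 + 1) - 2) a.toString ++ pvBLoop (pvBRun a r).2
  termination_by v => v.length
  decreasing_by simpa using Nat.lt_succ_of_le (pvBRun_rest_len a r)

def find_consecutive_3_strings_alt (value : String) : List String :=
  pvBLoop value.toList

-- ===== PRECONDITION & SPEC =====
def Spec_find_consecutive_3_strings (value : String) (out : List String) : Prop := out = find_consecutive_3_strings_alt value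
instance (value : String) (out : List String) : Decidable (Spec_find_consecutive_3_strings value out) := by unfold Spec_find_consecutive_3_strings; infer_instance

-- ===== CLAIM (what is proved, stated in full; the proofs are below) =====
def Claim_equal_find_consecutive_3_strings : Prop := ∀ (value : String), Dom_find_consecutive_3_strings value → Spec_find_consecutive_3_strings value (find_consecutive_3_strings value)

-- ===== LEMMAS AND PROOFS =====

-- canonical middle form: emit v[i] for every index i starting an equal triple
def pvTri : List Char → List String
  | a :: b :: c :: r => (if a = b ∧ a = c then [a.toString] else []) ++ pvTri (b :: c :: r)
  | _ => []

-- index-level condition at position i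
def pvF (v : List Char) (i : Nat) : Option String :=
  if i + 2 < v.length ∧ v.getD i 'x' = v.getD (i + 1) 'x' ∧ v.getD i 'x' = v.getD (i + 2) 'x'
  then some ((v.getD i 'x').toString) else none

theorem pvAInner_char (v : List Char) (i : Nat) (hi : i < v.length) :
    pvAInner v (v.getD i 'x') 1 (PySem.List.pyRange (i : Int) ((v.length : Int) - 1) 1)
      = pvF v i := by
  by_cases hA : i + 1 < v.length
  · rw [PySem.List.pyRange_one_cons (by omega)]
    have e1 : (i : Int) + 1 = ((i + 1 : Nat) : Int) := by push_cast; ring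
    have hg1 : v.getD (i + 1) 'x' = v[i + 1] := List.getD_eq_getElem v 'x' hA
    simp only [pvAInner, e1, PySem.List.pyGet?_natCast, List.getElem?_eq_getElem hA]
    by_cases h1 : v.getD i 'x' = v.getD (i + 1) 'x'
    · rw [if_pos (hg1 ▸ h1), if_neg (by norm_num)]
      by_cases hB : i + 2 < v.length
      · rw [PySem.List.pyRange_one_cons (by omega)]
        have e2 : ((i + 1 : Nat) : Int) + 1 = ((i + 2 : Nat) : Int) := by push_cast; ring
        have hg2 : v.getD (i + 2) 'x' = v[i + 2] := List.getD_eq_getElem v 'x' hB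
        simp only [pvAInner, e2, PySem.List.pyGet?_natCast, List.getElem?_eq_getElem hB]
        by_cases h2 : v.getD i 'x' = v.getD (i + 2) 'x'
        · rw [if_pos (hg2 ▸ h2)]
          unfold pvF
          exact (if_pos ⟨hB, h1, h2⟩).symm
        · rw [if_neg (hg2 ▸ h2)]
          unfold pvF
          exact (if_neg (fun hc => h2 hc.2.2)).symm
      · rw [PySem.List.pyRange_one_eq_nil (by omega)]
        simp [pvAInner, pvF]
        omega
    · rw [if_neg (hg1 ▸ h1)]
      unfold pvF
      exact (if_neg (fun hc => h1 hc.2.1)).symm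
  · rw [PySem.List.pyRange_one_eq_nil (by omega)]
    simp [pvAInner, pvF]
    omega

theorem pvAOuter_filterMap (v : List Char) (l : List Int) :
    pvAOuter v l = l.filterMap (fun i =>
      match PySem.List.pyGet? v i with
      | none => none
      | some ci => pvAInner v ci 1 (PySem.List.pyRange i ((v.length : Int) - 1) 1)) := by
  induction l with
  | nil => rfl
  | cons i is ih =>
      simp only [pvAOuter, List.filterMap_cons]
      cases PySem.List.pyGet? v i with
      | none => exact ih
      | some ci =>
          cases h : pvAInner v ci 1 (PySem.List.pyRange i ((v.length : Int) - 1) 1) <;> simp [h, ih]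

theorem pvF_cons_succ (a : Char) (t : List Char) (i : Nat) :
    pvF (a :: t) (i + 1) = pvF t i := by
  have hl : (i + 1 + 2 < (a :: t).length) ↔ (i + 2 < t.length) := by simp; omega
  have g1 : (a :: t).getD (i + 1) 'x' = t.getD i 'x' := rfl
  have g2 : (a :: t).getD (i + 1 + 1) 'x' = t.getD (i + 1) 'x' := rfl
  have g3 : (a :: t).getD (i + 1 + 2) 'x' = t.getD (i + 2) 'x' := rfl
  unfold pvF
  rw [g1, g2, g3]
  simp only [hl]

theorem pvTri_filterMap (v : List Char) :
    (List.range v.length).filterMap (pvF v) = pvTri v := by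
  induction v with
  | nil => rfl
  | cons a t ih =>
      rw [List.length_cons, List.range_succ_eq_map, List.filterMap_cons, List.filterMap_map]
      have hrest : List.filterMap (pvF (a :: t) ∘ (· + 1)) (List.range t.length) = pvTri t := by
        rw [show (pvF (a :: t) ∘ (· + 1)) = pvF t from funext (pvF_cons_succ a t), ih]
      cases t with
      | nil => simp [pvF] at hrest ⊢; exact hrest
      | cons b t' =>
          cases t' with
          | nil => simpa [pvF, pvTri] using hrest
          | cons c r =>
              by_cases h : a = b ∧ a = c
              · have : pvF (a :: b :: c :: r) 0 = some a.toString := by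
                  unfold pvF
                  rw [if_pos ⟨by simp, h.1, h.2⟩]
                  rfl
                simp only [this, pvTri, if_pos h]
                rw [hrest]
                rfl
              · have : pvF (a :: b :: c :: r) 0 = none := by
                  unfold pvF
                  exact if_neg (fun hc => h ⟨hc.2.1, hc.2.2⟩)
                simp only [this, pvTri, if_neg h]
                rw [hrest]
                rfl

theorem pvA_eq_tri (v : List Char) :
    pvAOuter v (PySem.List.pyRange 0 (v.length : Int) 1) = pvTri v := by
  rw [pvAOuter_filterMap, PySem.List.pyRange_one]
  simp only [sub_zero, Int.toNat_natCast]
  rw [List.filterMap_map, ← pvTri_filterMap v]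
  apply List.filterMap_congr
  intro k hk
  have hk' : k < v.length := List.mem_range.mp hk
  have e0 : ((0 : Int) + (k : Nat)) = ((k : Nat) : Int) := by ring
  simp only [Function.comp, e0, PySem.List.pyGet?_natCast, List.getElem?_eq_getElem hk']
  have hg : v[k] = v.getD k 'x' := (List.getD_eq_getElem v 'x' hk').symm
  rw [show (v[k] : Char) = v.getD k 'x' from hg]
  exact pvAInner_char v k hk'

theorem pvTri_run (a : Char) (L : Nat) (tail : List Char)
    (h : ∀ b, tail.head? = some b → b ≠ a) :
    pvTri (List.replicate L a ++ tail) = List.replicate (L - 2) a.toString ++ pvTri tail := by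
  induction L with
  | zero => simp
  | succ L ih =>
      match L, ih with
      | 0, _ =>
          cases tail with
          | nil => rfl
          | cons b t =>
              cases t with
              | nil => rfl
              | cons c r =>
                  have hb : a ≠ b := fun e => h b rfl e.symm
                  simp [pvTri, hb]
      | 1, _ =>
          cases tail with
          | nil => rfl
          | cons c r =>
              have hc : a ≠ c := fun e => h c rfl e.symm
              cases r with
              | nil => simp [pvTri, hc]
              | cons d r' => simp [pvTri, hc]
      | (M + 2), ih =>
          have h1 : List.replicate (M + 3) a ++ tail
              = a :: a :: a :: (List.replicate M a ++ tail) := by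
            simp [List.replicate_succ]
          have h2 : a :: a :: (List.replicate M a ++ tail)
              = List.replicate (M + 2) a ++ tail := by simp [List.replicate_succ]
          have hih : pvTri (a :: a :: (List.replicate M a ++ tail))
              = List.replicate M a.toString ++ pvTri tail := by
            rw [h2, ih]; simp
          rw [h1, show pvTri (a :: a :: a :: (List.replicate M a ++ tail))
                = [a.toString] ++ pvTri (a :: a :: (List.replicate M a ++ tail)) from by
              simp [pvTri], hih]
          simp [List.replicate_succ]

theorem pvBRun_spec (a : Char) (r : List Char) :
    r = List.replicate (pvBRun a r).1 a ++ (pvBRun a r).2 ∧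
    (∀ b, (pvBRun a r).2.head? = some b → b ≠ a) := by
  induction r with
  | nil => simp [pvBRun]
  | cons b r ih =>
      by_cases hb : b = a
      · subst hb
        refine ⟨?_, ?_⟩
        · simp only [pvBRun, if_pos rfl]
          exact congrArg _ ih.1
        · intro c hc; exact ih.2 c (by simpa [pvBRun] using hc)
      · simp [pvBRun, hb]

theorem pvB_eq_tri (v : List Char) : pvBLoop v = pvTri v := by
  induction v using pvBLoop.induct with
  | case1 => rw [pvBLoop]; rfl
  | case2 a r ih =>
      rw [pvBLoop, ih]
      have hs := pvBRun_spec a r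
      have : pvTri (a :: r)
          = pvTri (List.replicate ((pvBRun a r).1 + 1) a ++ (pvBRun a r).2) := by
        rw [List.replicate_succ, List.cons_append]
        exact congrArg pvTri (congrArg (a :: ·) hs.1)
      rw [this, pvTri_run a _ _ hs.2]

-- ===== VERDICT (by name: the statement is the Claim_ definition above) =====
theorem find_consecutive_3_strings_spec : Claim_equal_find_consecutive_3_strings := by
  intro value _
  unfold Spec_find_consecutive_3_strings find_consecutive_3_strings find_consecutive_3_strings_alt
  rw [pvA_eq_tri, pvB_eq_tri]
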